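-- pv_equiv track=rewrite | github.com/ouyangrunqi/ToB_raas_ms | holding.py | get_weight_num
-- ===== SOURCE A (Python) =====
-- def get_weight_num(sum_v, weight_list):
--     """
--     获取weight从大到小的坐标
--     :return:
--     """
--     new_weight_num = []
--     for wd in sum_v:
--         for xx in weight_list:
--             for k, v in xx.items():
--                 if wd == v:
--                     new_weight_num.append(k)
--     return new_weight_num
-- ===== SOURCE B (Python) =====
-- def get_weight_num(sum_v, weight_list):
--     pairs = [(k, v) for xx in weight_list for k, v in xx.items()]
--     index = {}
--     for k, v in pairs:
--         index.setdefault(v, []).append(k)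
--     return [k for wd in sum_v for k in index.get(wd, [])]
-- ===== Notes on version B (the rewrite author's own statement) =====
-- stated objective: faster
-- what changed: B first flattens all dicts into one (key,value) pair list, builds a value-to-keys index from it in a single pass, and then answers each value with one hash lookup, instead of A's triple-nested rescan of every dict's items for every value.
import Mathlib
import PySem

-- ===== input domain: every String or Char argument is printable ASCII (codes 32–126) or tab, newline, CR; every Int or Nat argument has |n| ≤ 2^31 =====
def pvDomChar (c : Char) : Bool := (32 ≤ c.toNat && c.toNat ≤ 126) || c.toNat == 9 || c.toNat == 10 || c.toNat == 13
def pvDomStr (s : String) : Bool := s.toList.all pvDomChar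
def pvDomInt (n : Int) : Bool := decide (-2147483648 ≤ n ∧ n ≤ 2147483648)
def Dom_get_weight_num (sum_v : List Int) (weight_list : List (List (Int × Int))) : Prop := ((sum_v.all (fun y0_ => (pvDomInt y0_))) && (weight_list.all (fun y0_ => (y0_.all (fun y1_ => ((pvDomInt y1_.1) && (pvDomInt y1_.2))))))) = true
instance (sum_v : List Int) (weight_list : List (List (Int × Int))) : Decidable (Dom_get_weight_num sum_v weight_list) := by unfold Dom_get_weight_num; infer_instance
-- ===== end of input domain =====

-- B flattens the dicts once, builds a value→keys index from the flat pair list, and answers each value by one lookup (asymptotically faster than A's rescans).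

-- ===== PORT A =====
-- A: for each wd in sum_v, scan every dict's items and append matching keys.
def get_weight_num (sum_v : List Int) (weight_list : List (List (Int × Int))) : List Int :=
  sum_v.foldl (fun acc wd =>
    weight_list.foldl (fun acc xx =>
      ((PySem.Dict.ofList xx).items).foldl (fun acc kv =>
        if wd == kv.2 then acc ++ [kv.1] else acc) acc) acc) []

-- ===== PORT B =====
-- B: flatten to one pair list, build index value → list of keys, then one lookup per wd.
def get_weight_num_alt (sum_v : List Int) (weight_list : List (List (Int × Int))) : List Int :=
  let pairs : List (Int × Int) := weight_list.flatMap (fun xx => (PySem.Dict.ofList xx).items)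
  let index : PySem.Dict Int (List Int) :=
    pairs.foldl (fun d kv => d.modify kv.2 [] (fun l => l ++ [kv.1])) PySem.Dict.empty
  sum_v.flatMap (fun wd => index.getD wd [])

-- ===== PRECONDITION & SPEC =====
def Spec_get_weight_num (sum_v : List Int) (weight_list : List (List (Int × Int))) (out : List Int) : Prop := out = get_weight_num_alt sum_v weight_list
instance (sum_v : List Int) (weight_list : List (List (Int × Int))) (out : List Int) : Decidable (Spec_get_weight_num sum_v weight_list out) := by unfold Spec_get_weight_num; infer_instance

-- ===== CLAIM (what is proved, stated in full; the proofs are below) =====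
def Claim_equal_get_weight_num : Prop := ∀ (sum_v : List Int) (weight_list : List (List (Int × Int))), Dom_get_weight_num sum_v weight_list → Spec_get_weight_num sum_v weight_list (get_weight_num sum_v weight_list)

-- ===== LEMMAS AND PROOFS =====

-- the index fold, characterised: looking up wd yields the matching keys of the pair stream
lemma getD_build (pairs : List (Int × Int)) (d : PySem.Dict Int (List Int)) (wd : Int) :
    (pairs.foldl (fun d kv => d.modify kv.2 [] (fun l => l ++ [kv.1])) d).getD wd []
      = d.getD wd [] ++ (pairs.filter (fun kv => kv.2 == wd)).map Prod.fst := by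
  induction pairs generalizing d with
  | nil => simp
  | cons kv rest ih =>
    simp only [List.foldl_cons, ih, PySem.Dict.getD_modify]
    by_cases h : wd = kv.2
    · simp [h]
    · simp [h, Ne.symm h]

-- A's inner two loops, for one wd, collect the matching keys of the flat pair stream
lemma a_inner (weight_list : List (List (Int × Int))) (wd : Int) (acc : List Int) :
    weight_list.foldl (fun acc xx =>
        ((PySem.Dict.ofList xx).items).foldl (fun acc kv =>
          if wd == kv.2 then acc ++ [kv.1] else acc) acc) acc
      = acc ++ (((weight_list.flatMap (fun xx => (PySem.Dict.ofList xx).items)).filter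
          (fun kv => kv.2 == wd)).map Prod.fst) := by
  induction weight_list generalizing acc with
  | nil => simp
  | cons xx rest ih =>
    simp only [List.foldl_cons, ih, List.flatMap_cons, List.filter_append,
      List.map_append, ← List.append_assoc]
    congr 1
    rw [PySem.List.foldl_append_if (fun kv => wd == kv.2) Prod.fst]
    congr 1
    congr 1
    apply List.filter_congr
    intro kv _
    simp [eq_comm]

-- ===== VERDICT (by name: the statement is the Claim_ definition above) =====
theorem get_weight_num_spec : Claim_equal_get_weight_num := by
  intro sum_v weight_list _
  unfold Spec_get_weight_num get_weight_num get_weight_num_alt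
  simp only [a_inner, getD_build, PySem.Dict.getD_empty, List.nil_append]
  rw [PySem.List.foldl_append_eq_flatMap]
  simp
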